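-- pv_equiv track=rewrite | github.com/oizgagin/adventofcode2024 | 04/1.py | solution
-- ===== SOURCE A (Python) =====
-- def solution(wordsearch):
--
--     def neighs(i, j):
--         is_valid = lambda i, j: 0 <= i < len(wordsearch) and 0 <= j < len(wordsearch[i])
--
--         for di in (-1, 0, 1):
--             for dj in (-1, 0, 1):
--                 if di == dj == 0: continue
--
--                 coords = [(i + di*d, j + dj*d) for d in range(0, 4)]
--                 if all(map(lambda c: is_valid(*c), coords)):
--                     yield coords
--
--     res = 0
--     for i in range(0, len(wordsearch)):
--         for j in range(0, len(wordsearch[i])):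
--             for coords in neighs(i, j):
--                 if [wordsearch[ni][nj] for ni, nj in coords] == ['X', 'M', 'A', 'S']:
--                     res += 1
--
--     return res
-- ===== SOURCE B (Python) =====
-- def solution(wordsearch):
--     XMAS = ('X', 'M', 'A', 'S')
--     SAMX = ('S', 'A', 'M', 'X')
--
--     def count4(a, b, c, d):
--         return sum(1 for t in zip(a, b, c, d) if t == XMAS or t == SAMX)
--
--     res = 0
--     for r in wordsearch:
--         res += count4(r, r[1:], r[2:], r[3:])
--     for r0, r1, r2, r3 in zip(wordsearch, wordsearch[1:], wordsearch[2:], wordsearch[3:]):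
--         res += count4(r0, r1, r2, r3)
--         res += count4(r0, r1[1:], r2[2:], r3[3:])
--         res += count4(r0[3:], r1[2:], r2[1:], r3)
--     return res
-- ===== Notes on version B (the rewrite author's own statement) =====
-- stated objective: faster
-- what changed: Replaces the per-cell 8-direction scan (which builds a coordinate list and runs a lambda validity check per direction per cell) with slice/zip window counting: each of the four line families (rows, and row quadruples vertically and along both diagonals) is scanned once by zipping shifted slices and counting windows equal to XMAS or SAMX; zip truncation replaces the explicit bounds predicate.
import Mathlib
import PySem

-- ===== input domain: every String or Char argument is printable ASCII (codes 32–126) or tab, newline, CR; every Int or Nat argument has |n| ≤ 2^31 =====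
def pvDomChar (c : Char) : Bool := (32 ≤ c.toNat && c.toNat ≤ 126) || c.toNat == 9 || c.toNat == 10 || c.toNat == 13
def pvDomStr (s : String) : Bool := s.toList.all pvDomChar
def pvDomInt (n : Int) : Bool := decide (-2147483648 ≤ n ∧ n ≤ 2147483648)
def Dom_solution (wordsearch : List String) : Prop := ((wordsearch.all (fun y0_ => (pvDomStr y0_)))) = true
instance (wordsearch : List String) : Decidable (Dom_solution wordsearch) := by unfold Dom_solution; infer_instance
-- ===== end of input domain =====

-- B replaces A's per-cell 8-direction coordinate lists and validity checks by zip/slice window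
-- counting over the four line families (rows, and row quadruples vertically and along both
-- diagonals), counting windows equal to XMAS or SAMX; objective: faster by a constant factor
-- (no coordinate lists, no per-coordinate bounds lambdas; a timing run measured it).

-- ===== PORT A =====
-- is_valid: Python short-circuits, so wordsearch[i] is only read when 0 <= i < len; the
-- `.getD ""` default is therefore never the value used.
def pvIsValid (ws : List String) (i j : Int) : Bool :=
  decide (0 ≤ i) && decide (i < (ws.length : Int)) && decide (0 ≤ j) &&
    decide (j < PySem.Str.len ((PySem.List.pyGet? ws i).getD ""))

-- wordsearch[ni][nj]; the port compares Option values against [some 'X', …], which is exact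
-- because A only evaluates the comparison after `all is_valid` guarantees every access is valid.
def pvCharAt (ws : List String) (i j : Int) : Option Char :=
  (PySem.List.pyGet? ws i).bind fun r => PySem.Str.pyGet? r j

-- the (di, dj) pairs in Python's iteration order, (0,0) skipped
def pvDirs : List (Int × Int) := [(-1,-1),(-1,0),(-1,1),(0,-1),(0,1),(1,-1),(1,0),(1,1)]

def pvNeighs (ws : List String) (i j : Int) : List (List (Int × Int)) :=
  pvDirs.filterMap fun dd =>
    let coords := (PySem.List.pyRange 0 4 1).map fun d => (i + dd.1 * d, j + dd.2 * d)
    if coords.all fun c => pvIsValid ws c.1 c.2 then some coords else none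

def solution (wordsearch : List String) : Int :=
  (PySem.List.pyRange 0 (wordsearch.length : Int) 1).foldl (fun res i =>
    (PySem.List.pyRange 0 (PySem.Str.len ((PySem.List.pyGet? wordsearch i).getD "")) 1).foldl
      (fun res j =>
        (pvNeighs wordsearch i j).foldl (fun res coords =>
          if coords.map (fun c => pvCharAt wordsearch c.1 c.2) =
              [some 'X', some 'M', some 'A', some 'S'] then res + 1 else res) res) res) 0

-- ===== PORT B =====
-- zip(a, b, c, d): truncates to the shortest argument
def pvZip4 {α : Type} : List α → List α → List α → List α → List (α × α × α × α)
  | a :: as, b :: bs, c :: cs, d :: ds => (a, b, c, d) :: pvZip4 as bs cs ds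
  | _, _, _, _ => []

-- count4: windows equal to XMAS or SAMX among the zipped quadruples
def pvCount4 (a b c d : List Char) : Int :=
  (pvZip4 a b c d).foldl
    (fun n t => if t = ('X','M','A','S') ∨ t = ('S','A','M','X') then n + 1 else n) 0

-- string/list slices r[k:] with k ≥ 0 are List.drop k on the character list
def solution_alt (wordsearch : List String) : Int :=
  let horiz := wordsearch.foldl (fun res r =>
    let l := r.toList
    res + pvCount4 l (l.drop 1) (l.drop 2) (l.drop 3)) 0
  (pvZip4 wordsearch (wordsearch.drop 1) (wordsearch.drop 2) (wordsearch.drop 3)).foldl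
    (fun res q =>
      let a := q.1.toList
      let b := q.2.1.toList
      let c := q.2.2.1.toList
      let d := q.2.2.2.toList
      res + pvCount4 a b c d + pvCount4 a (b.drop 1) (c.drop 2) (d.drop 3) +
        pvCount4 (a.drop 3) (b.drop 2) (c.drop 1) d) horiz

-- ===== PRECONDITION & SPEC =====
def Spec_solution (wordsearch : List String) (out : Int) : Prop := out = solution_alt wordsearch
instance (wordsearch : List String) (out : Int) : Decidable (Spec_solution wordsearch out) := by
  unfold Spec_solution; infer_instance

-- ===== CLAIM (what is proved, stated in full; the proofs are below) =====
def Claim_equal_solution : Prop := ∀ (wordsearch : List String), Dom_solution wordsearch → Spec_solution wordsearch (solution wordsearch)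

-- ===== LEMMAS AND PROOFS =====

-- common normal form: both programs count, over a box large enough to contain the grid,
-- the windows of the four line families that read XMAS or SAMX.

def pvRows (ws : List String) : List (List Char) := ws.map String.toList

def pvG (rows : List (List Char)) (i j : ℕ) : Option Char := rows[i]?.bind fun r => r[j]?

def pvGZ (rows : List (List Char)) (i j : Int) : Option Char :=
  if 0 ≤ i ∧ 0 ≤ j then pvG rows i.toNat j.toNat else none

def pvComb {α : Type} : Option α → Option α → Option α → Option α → Option (α × α × α × α)
  | some a, some b, some c, some d => some (a, b, c, d)
  | _, _, _, _ => none

def pvWinH (rows : List (List Char)) (i k : ℕ) : Option (Char × Char × Char × Char) :=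
  pvComb (pvG rows i k) (pvG rows i (k+1)) (pvG rows i (k+2)) (pvG rows i (k+3))
def pvWinV (rows : List (List Char)) (i k : ℕ) : Option (Char × Char × Char × Char) :=
  pvComb (pvG rows i k) (pvG rows (i+1) k) (pvG rows (i+2) k) (pvG rows (i+3) k)
def pvWinDR (rows : List (List Char)) (i k : ℕ) : Option (Char × Char × Char × Char) :=
  pvComb (pvG rows i k) (pvG rows (i+1) (k+1)) (pvG rows (i+2) (k+2)) (pvG rows (i+3) (k+3))
def pvWinDL (rows : List (List Char)) (i k : ℕ) : Option (Char × Char × Char × Char) :=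
  pvComb (pvG rows i (k+3)) (pvG rows (i+1) (k+2)) (pvG rows (i+2) (k+1)) (pvG rows (i+3) k)

def pvIX (o : Option (Char × Char × Char × Char)) : ℕ := if o = some ('X','M','A','S') then 1 else 0
def pvIS (o : Option (Char × Char × Char × Char)) : ℕ := if o = some ('S','A','M','X') then 1 else 0

def pvCell (rows : List (List Char)) (i k : ℕ) : ℕ :=
  pvIX (pvWinH rows i k) + pvIS (pvWinH rows i k) + pvIX (pvWinV rows i k) + pvIS (pvWinV rows i k) +
  pvIX (pvWinDR rows i k) + pvIS (pvWinDR rows i k) + pvIX (pvWinDL rows i k) + pvIS (pvWinDL rows i k)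

def pvMaxLen (rows : List (List Char)) : ℕ := (rows.map List.length).foldr Nat.max 0

def pvM (ws : List String) : ℕ := ws.length + pvMaxLen (pvRows ws) + 3

def pvNF (ws : List String) : ℕ :=
  ∑ i ∈ Finset.range (pvM ws), ∑ k ∈ Finset.range (pvM ws), pvCell (pvRows ws) i k

-- the per-(i,j,direction) Bool condition of A
def pvOkA (ws : List String) (i j : Int) (dd : Int × Int) : Bool :=
  let coords := (PySem.List.pyRange 0 4 1).map fun d => (i + dd.1 * d, j + dd.2 * d)
  (coords.all fun c => pvIsValid ws c.1 c.2) &&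
    decide (coords.map (fun c => pvCharAt ws c.1 c.2) = [some 'X', some 'M', some 'A', some 'S'])

-- ---- generic sum toolkit ----

lemma pvSumListInt (n : ℕ) (f : ℕ → ℕ) :
    ((List.range n).map (fun k => (f k : Int))).sum = ((∑ i ∈ Finset.range n, f i : ℕ) : Int) := by
  induction n with
  | zero => simp
  | succ n ih => simp [List.range_succ, Finset.sum_range_succ, ih]

lemma pvExtend {a b : ℕ} (f : ℕ → ℕ) (hab : a ≤ b) (h : ∀ k, a ≤ k → f k = 0) :
    ∑ k ∈ Finset.range a, f k = ∑ k ∈ Finset.range b, f k := by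
  apply Finset.sum_subset (by intro x hx; rw [Finset.mem_range] at *; omega)
  intro k _ hk
  exact h k (by simpa using hk)

lemma pvShift3 {Mv : ℕ} (f : ℕ → ℕ) (h3 : 3 ≤ Mv) (h0 : ∀ k, k < 3 → f k = 0)
    (hM : ∀ k, Mv ≤ k → f k = 0) :
    ∑ k ∈ Finset.range Mv, f k = ∑ k ∈ Finset.range Mv, f (k + 3) := by
  have e1 : ∑ k ∈ Finset.range Mv, f (k + 3) = ∑ k ∈ Finset.range (Mv - 3), f (k + 3) :=
    (pvExtend _ (by omega) (fun k hk => hM _ (by omega))).symm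
  have e2 : ∑ k ∈ Finset.range (Mv - 3), f (3 + k) = ∑ k ∈ Finset.Ico 3 Mv, f k :=
    (Finset.sum_Ico_eq_sum_range f 3 Mv).symm
  have e3 : ∑ k ∈ Finset.range Mv, f k = ∑ k ∈ Finset.Ico 3 Mv, f k := by
    rw [Finset.range_eq_Ico, ← Finset.sum_Ico_consecutive f (Nat.zero_le 3) h3]
    have : ∑ k ∈ Finset.Ico 0 3, f k = 0 :=
      Finset.sum_eq_zero (fun k hk => h0 k (by simpa using (Finset.mem_Ico.1 hk).2))
    omega
  rw [e1, e3, ← e2]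
  exact Finset.sum_congr rfl (fun k _ => by rw [Nat.add_comm])

lemma pvCountP_sum {α : Type} (p : α → Bool) (l : List α) {m : ℕ} (hm : l.length ≤ m) :
    (l.countP p : ℕ) = ∑ k ∈ Finset.range m, (if (l[k]?.map p).getD false then 1 else 0) := by
  have base : ∀ (l : List α), (l.countP p : ℕ)
      = ∑ k ∈ Finset.range l.length, (if (l[k]?.map p).getD false then 1 else 0) := by
    intro l
    induction l with
    | nil => simp
    | cons a l ih =>
      rw [List.length_cons, List.countP_cons, Finset.sum_range_succ', ih]
      simp only [List.getElem?_cons_succ, List.getElem?_cons_zero, Option.map_some,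
        Option.getD_some]
      rfl
  rw [base l]
  exact pvExtend _ hm (fun k hk => by simp [List.getElem?_eq_none hk])

-- ---- zip4 facts ----

lemma pvZip4_getElem? {α : Type} (xs ys zs ws : List α) (k : ℕ) :
    (pvZip4 xs ys zs ws)[k]? = pvComb xs[k]? ys[k]? zs[k]? ws[k]? := by
  induction xs generalizing ys zs ws k with
  | nil => cases ys <;> cases zs <;> cases ws <;> simp [pvZip4, pvComb]
  | cons x xs ih =>
    cases ys with
    | nil => simp [pvZip4, pvComb]
    | cons y ys =>
      cases zs with
      | nil => simp [pvZip4, pvComb]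
      | cons z zs =>
        cases ws with
        | nil => simp [pvZip4, pvComb]
        | cons w ws =>
          cases k with
          | zero => simp [pvZip4, pvComb]
          | succ k => simp [pvZip4, ih]

lemma pvZip4_length {α : Type} (xs ys zs ws : List α) :
    (pvZip4 xs ys zs ws).length = Nat.min (Nat.min (Nat.min xs.length ys.length) zs.length) ws.length := by
  induction xs generalizing ys zs ws with
  | nil => cases ys <;> cases zs <;> cases ws <;> simp [pvZip4]
  | cons x xs ih =>
    cases ys with
    | nil => simp [pvZip4]
    | cons y ys =>
      cases zs with
      | nil => simp [pvZip4]
      | cons z zs =>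
        cases ws with
        | nil => simp [pvZip4]
        | cons w ws => simp [pvZip4, ih]

lemma pvComb_eq_some {α : Type} (o1 o2 o3 o4 : Option α) (a b c d : α) :
    pvComb o1 o2 o3 o4 = some (a, b, c, d) ↔
      o1 = some a ∧ o2 = some b ∧ o3 = some c ∧ o4 = some d := by
  cases o1 <;> cases o2 <;> cases o3 <;> cases o4 <;> simp [pvComb]

-- indicator splitting: a window is XMAS or SAMX, never both
lemma pvInd_split (o : Option (Char × Char × Char × Char)) :
    (if (o.map fun t => decide (t = ('X','M','A','S') ∨ t = ('S','A','M','X'))).getD false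
      then 1 else 0) = pvIX o + pvIS o := by
  cases o with
  | none => simp [pvIX, pvIS]
  | some t =>
    by_cases h1 : t = ('X','M','A','S')
    · subst h1; simp [pvIX, pvIS]
    · by_cases h2 : t = ('S','A','M','X')
      · subst h2; simp [pvIX, pvIS]
      · simp [pvIX, pvIS, h1, h2]

lemma pvCount4_eq (xs ys zs ws : List Char) {m : ℕ} (hm : xs.length ≤ m) :
    pvCount4 xs ys zs ws =
      ((∑ k ∈ Finset.range m,
        (pvIX (pvComb xs[k]? ys[k]? zs[k]? ws[k]?) + pvIS (pvComb xs[k]? ys[k]? zs[k]? ws[k]?)) : ℕ) : Int) := by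
  unfold pvCount4
  rw [show (fun (n : Int) (t : Char × Char × Char × Char) =>
        if t = ('X','M','A','S') ∨ t = ('S','A','M','X') then n + 1 else n)
      = (fun (n : Int) (t : Char × Char × Char × Char) =>
        if (fun t => decide (t = ('X','M','A','S') ∨ t = ('S','A','M','X'))) t = true
        then n + 1 else n) from by funext n t; simp]
  rw [PySem.List.foldl_count_if]
  have hlen : (pvZip4 xs ys zs ws).length ≤ m := by
    rw [pvZip4_length]
    exact le_trans (le_trans (le_trans (Nat.min_le_left _ _) (Nat.min_le_left _ _))
      (Nat.min_le_left _ _)) hm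
  rw [pvCountP_sum _ _ hlen]
  rw [zero_add]
  congr 1
  refine Finset.sum_congr rfl (fun k _ => ?_)
  rw [pvZip4_getElem?, pvInd_split]

-- ---- bounds / vanishing facts ----

lemma pvG_some_bounds {rows : List (List Char)} {i j : ℕ} {c : Char} (h : pvG rows i j = some c) :
    i < rows.length ∧ j < (rows.getD i []).length := by
  unfold pvG at h
  cases hr : rows[i]? with
  | none => rw [hr] at h; simp at h
  | some r =>
    rw [hr] at h
    simp only [Option.bind_some] at h
    have hi : i < rows.length := by
      by_contra hc
      rw [List.getElem?_eq_none (by omega)] at hr; simp at hr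
    have hj : j < r.length := by
      by_contra hc
      rw [List.getElem?_eq_none (by omega)] at h; simp at h
    refine ⟨hi, ?_⟩
    have hg : rows.getD i [] = r := by simp [List.getD, hr]
    rw [hg]; exact hj

lemma pvRlen_le_max (rows : List (List Char)) (i : ℕ) :
    (rows.getD i []).length ≤ pvMaxLen rows := by
  unfold pvMaxLen
  induction rows generalizing i with
  | nil => simp
  | cons r rows ih =>
    cases i with
    | zero => simp only [List.getD_cons_zero, List.map_cons, List.foldr_cons]
              exact Nat.le_max_left _ _
    | succ i => simp only [List.getD_cons_succ, List.map_cons, List.foldr_cons]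
                exact le_trans (ih i) (Nat.le_max_right _ _)

-- ---- A-side characterization ----

lemma pvVC (ws : List String) (a b : Int) (c : Char) :
    (pvIsValid ws a b = true ∧ pvCharAt ws a b = some c) ↔ pvGZ (pvRows ws) a b = some c := by
  by_cases ha : 0 ≤ a
  · by_cases hb : 0 ≤ b
    · obtain ⟨aN, rfl⟩ : ∃ n : ℕ, a = (n : Int) := ⟨a.toNat, (Int.toNat_of_nonneg ha).symm⟩
      obtain ⟨bN, rfl⟩ : ∃ n : ℕ, b = (n : Int) := ⟨b.toNat, (Int.toNat_of_nonneg hb).symm⟩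
      simp only [pvIsValid, pvCharAt, pvGZ, pvRows, pvG, PySem.List.pyGet?_natCast,
        PySem.Str.pyGet?_natCast, PySem.Str.len_eq, List.getElem?_map, Int.toNat_natCast,
        ha, hb, decide_true, Bool.true_and, Bool.and_eq_true, decide_eq_true_eq]
      cases hr : ws[aN]? with
      | none => simp [hr]
      | some r =>
        simp only [hr, Option.map_some, Option.bind_some, Option.getD_some, and_self, if_true]
        constructor
        · exact fun h => h.2
        · intro h2
          have haN : aN < ws.length := (List.getElem?_eq_some_iff.mp hr).1
          have hbN : bN < r.toList.length := (List.getElem?_eq_some_iff.mp h2).1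
          exact ⟨⟨⟨by exact_mod_cast haN, trivial⟩, by exact_mod_cast hbN⟩, h2⟩
    · simp [pvIsValid, pvGZ, hb]
  · simp [pvIsValid, pvGZ, ha]

lemma pvFoldl_filterMap {α β : Type} (l : List α) (g : α → Option β) (P : β → Prop)
    [DecidablePred P] (r : Int) :
    (l.filterMap g).foldl (fun r c => if P c then r + 1 else r) r
      = r + ((l.countP fun x => ((g x).map fun c => decide (P c)).getD false : ℕ) : Int) := by
  induction l generalizing r with
  | nil => simp
  | cons a l ih =>
    cases hg : g a with
    | none => simp [List.filterMap_cons, hg, ih, List.countP_cons]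
    | some b =>
      by_cases hP : P b <;>
        simp [List.filterMap_cons, hg, ih, List.countP_cons, hP] <;> push_cast <;> ring

lemma pvInner (ws : List String) (i j : Int) (res : Int) :
    (pvNeighs ws i j).foldl (fun res coords =>
        if coords.map (fun c => pvCharAt ws c.1 c.2) =
            [some 'X', some 'M', some 'A', some 'S'] then res + 1 else res) res
      = res + (pvDirs.countP (pvOkA ws i j) : Int) := by
  unfold pvNeighs
  rw [pvFoldl_filterMap]
  congr 2
  apply List.countP_congr
  intro dd _
  unfold pvOkA
  by_cases hC : ((PySem.List.pyRange 0 4 1).map fun d => (i + dd.1 * d, j + dd.2 * d)).all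
      (fun c => pvIsValid ws c.1 c.2) = true <;>
    simp [hC]

lemma pvRange4 : PySem.List.pyRange 0 4 1 = [0, 1, 2, 3] := by decide

lemma pvGZ_ofNat (rows : List (List Char)) (i j : ℕ) :
    pvGZ rows (i : Int) (j : Int) = pvG rows i j := by
  simp [pvGZ]

lemma pvOkA_iff (ws : List String) (i j : Int) (dd : Int × Int) :
    pvOkA ws i j dd = true ↔
      (pvGZ (pvRows ws) i j = some 'X' ∧ pvGZ (pvRows ws) (i + dd.1) (j + dd.2) = some 'M' ∧
       pvGZ (pvRows ws) (i + dd.1 * 2) (j + dd.2 * 2) = some 'A' ∧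
       pvGZ (pvRows ws) (i + dd.1 * 3) (j + dd.2 * 3) = some 'S') := by
  unfold pvOkA
  rw [pvRange4]
  simp only [List.map_cons, List.map_nil, List.all_cons, List.all_nil, Bool.and_true,
    Bool.and_eq_true, decide_eq_true_eq, List.cons.injEq, and_true, mul_zero, add_zero, mul_one]
  constructor
  · rintro ⟨⟨V0, V1, V2, V3⟩, E0, E1, E2, E3⟩
    exact ⟨(pvVC _ _ _ _).mp ⟨V0, E0⟩, (pvVC _ _ _ _).mp ⟨V1, E1⟩,
      (pvVC _ _ _ _).mp ⟨V2, E2⟩, (pvVC _ _ _ _).mp ⟨V3, E3⟩⟩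
  · rintro ⟨G0, G1, G2, G3⟩
    obtain ⟨V0, E0⟩ := (pvVC _ _ _ _).mpr G0
    obtain ⟨V1, E1⟩ := (pvVC _ _ _ _).mpr G1
    obtain ⟨V2, E2⟩ := (pvVC _ _ _ _).mpr G2
    obtain ⟨V3, E3⟩ := (pvVC _ _ _ _).mpr G3
    exact ⟨⟨V0, V1, V2, V3⟩, E0, E1, E2, E3⟩

-- the eight directions, characterized through the window functions
lemma pvOkA_01 (ws : List String) (i j : ℕ) :
    pvOkA ws (i : Int) (j : Int) (0, 1) = decide (pvWinH (pvRows ws) i j = some ('X','M','A','S')) := by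
  rw [Bool.eq_iff_iff, pvOkA_iff]
  simp only [decide_eq_true_eq]
  norm_num
  rw [show ((j:Int)+1) = ((j+1:ℕ):Int) by push_cast; ring,
      show ((j:Int)+2) = ((j+2:ℕ):Int) by push_cast; ring,
      show ((j:Int)+3) = ((j+3:ℕ):Int) by push_cast; ring,
      pvGZ_ofNat, pvGZ_ofNat, pvGZ_ofNat, pvGZ_ofNat]
  unfold pvWinH
  rw [pvComb_eq_some]
lemma pvOkA_0m1 (ws : List String) (i j : ℕ) :
    pvOkA ws (i : Int) (j : Int) (0, -1) =
      (decide (3 ≤ j) && decide (pvWinH (pvRows ws) i (j - 3) = some ('S','A','M','X'))) := by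
  rw [Bool.eq_iff_iff, pvOkA_iff]
  simp only [decide_eq_true_eq, Bool.and_eq_true]
  norm_num
  by_cases h3 : 3 ≤ j
  · simp only [h3, true_and]
    rw [show ((j:Int) + -1) = ((j-1:ℕ):Int) by omega,
        show ((j:Int) + -2) = ((j-2:ℕ):Int) by omega,
        show ((j:Int) + -3) = ((j-3:ℕ):Int) by omega,
        pvGZ_ofNat, pvGZ_ofNat, pvGZ_ofNat, pvGZ_ofNat]
    unfold pvWinH
    rw [pvComb_eq_some,
        show j - 3 + 1 = j - 2 by omega, show j - 3 + 2 = j - 1 by omega,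
        show j - 3 + 3 = j by omega]
    tauto
  · simp only [h3, false_and, iff_false]
    rintro ⟨_, _, _, hS⟩
    rw [show ((j:Int) + -3) = (j:Int) - 3 by ring] at hS
    simp [pvGZ] at hS
    exact h3 hS.1
lemma pvOkA_10 (ws : List String) (i j : ℕ) :
    pvOkA ws (i : Int) (j : Int) (1, 0) = decide (pvWinV (pvRows ws) i j = some ('X','M','A','S')) := by
  rw [Bool.eq_iff_iff, pvOkA_iff]
  simp only [decide_eq_true_eq]
  norm_num
  rw [show ((i:Int)+1) = ((i+1:ℕ):Int) by push_cast; ring,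
      show ((i:Int)+2) = ((i+2:ℕ):Int) by push_cast; ring,
      show ((i:Int)+3) = ((i+3:ℕ):Int) by push_cast; ring,
      pvGZ_ofNat, pvGZ_ofNat, pvGZ_ofNat, pvGZ_ofNat]
  unfold pvWinV
  rw [pvComb_eq_some]
lemma pvOkA_m10 (ws : List String) (i j : ℕ) :
    pvOkA ws (i : Int) (j : Int) (-1, 0) =
      (decide (3 ≤ i) && decide (pvWinV (pvRows ws) (i - 3) j = some ('S','A','M','X'))) := by
  rw [Bool.eq_iff_iff, pvOkA_iff]
  simp only [decide_eq_true_eq, Bool.and_eq_true]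
  norm_num
  by_cases h3 : 3 ≤ i
  · simp only [h3, true_and]
    rw [show ((i:Int) + -1) = ((i-1:ℕ):Int) by omega,
        show ((i:Int) + -2) = ((i-2:ℕ):Int) by omega,
        show ((i:Int) + -3) = ((i-3:ℕ):Int) by omega,
        pvGZ_ofNat, pvGZ_ofNat, pvGZ_ofNat, pvGZ_ofNat]
    unfold pvWinV
    rw [pvComb_eq_some,
        show i - 3 + 1 = i - 2 by omega, show i - 3 + 2 = i - 1 by omega,
        show i - 3 + 3 = i by omega]
    tauto
  · simp only [h3, false_and, iff_false]
    rintro ⟨_, _, _, hS⟩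
    rw [show ((i:Int) + -3) = (i:Int) - 3 by ring] at hS
    simp [pvGZ] at hS
    exact h3 hS.1
lemma pvOkA_11 (ws : List String) (i j : ℕ) :
    pvOkA ws (i : Int) (j : Int) (1, 1) = decide (pvWinDR (pvRows ws) i j = some ('X','M','A','S')) := by
  rw [Bool.eq_iff_iff, pvOkA_iff]
  simp only [decide_eq_true_eq]
  norm_num
  rw [show ((i:Int)+1) = ((i+1:ℕ):Int) by push_cast; ring,
      show ((i:Int)+2) = ((i+2:ℕ):Int) by push_cast; ring,
      show ((i:Int)+3) = ((i+3:ℕ):Int) by push_cast; ring,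
      show ((j:Int)+1) = ((j+1:ℕ):Int) by push_cast; ring,
      show ((j:Int)+2) = ((j+2:ℕ):Int) by push_cast; ring,
      show ((j:Int)+3) = ((j+3:ℕ):Int) by push_cast; ring,
      pvGZ_ofNat, pvGZ_ofNat, pvGZ_ofNat, pvGZ_ofNat]
  unfold pvWinDR
  rw [pvComb_eq_some]
lemma pvOkA_m1m1 (ws : List String) (i j : ℕ) :
    pvOkA ws (i : Int) (j : Int) (-1, -1) =
      (decide (3 ≤ i) && decide (3 ≤ j) &&
        decide (pvWinDR (pvRows ws) (i - 3) (j - 3) = some ('S','A','M','X'))) := by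
  rw [Bool.eq_iff_iff, pvOkA_iff]
  simp only [decide_eq_true_eq, Bool.and_eq_true]
  norm_num
  by_cases hi : 3 ≤ i
  · by_cases hj : 3 ≤ j
    · simp only [hi, hj, true_and]
      rw [show ((i:Int) + -1) = ((i-1:ℕ):Int) by omega,
          show ((i:Int) + -2) = ((i-2:ℕ):Int) by omega,
          show ((i:Int) + -3) = ((i-3:ℕ):Int) by omega,
          show ((j:Int) + -1) = ((j-1:ℕ):Int) by omega,
          show ((j:Int) + -2) = ((j-2:ℕ):Int) by omega,
          show ((j:Int) + -3) = ((j-3:ℕ):Int) by omega,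
          pvGZ_ofNat, pvGZ_ofNat, pvGZ_ofNat, pvGZ_ofNat]
      unfold pvWinDR
      rw [pvComb_eq_some,
          show i - 3 + 1 = i - 2 by omega, show i - 3 + 2 = i - 1 by omega,
          show i - 3 + 3 = i by omega,
          show j - 3 + 1 = j - 2 by omega, show j - 3 + 2 = j - 1 by omega,
          show j - 3 + 3 = j by omega]
      tauto
    · simp only [hj, and_false, false_and, iff_false]
      rintro ⟨_, _, _, hS⟩
      rw [show ((j:Int) + -3) = (j:Int) - 3 by ring] at hS
      simp [pvGZ] at hS
      exact hj hS.1.2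
  · simp only [hi, false_and, iff_false]
    rintro ⟨_, _, _, hS⟩
    rw [show ((i:Int) + -3) = (i:Int) - 3 by ring] at hS
    simp [pvGZ] at hS
    exact hi hS.1.1
lemma pvOkA_1m1 (ws : List String) (i j : ℕ) :
    pvOkA ws (i : Int) (j : Int) (1, -1) =
      (decide (3 ≤ j) && decide (pvWinDL (pvRows ws) i (j - 3) = some ('X','M','A','S'))) := by
  rw [Bool.eq_iff_iff, pvOkA_iff]
  simp only [decide_eq_true_eq, Bool.and_eq_true]
  norm_num
  by_cases h3 : 3 ≤ j
  · simp only [h3, true_and]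
    rw [show ((i:Int)+1) = ((i+1:ℕ):Int) by push_cast; ring,
        show ((i:Int)+2) = ((i+2:ℕ):Int) by push_cast; ring,
        show ((i:Int)+3) = ((i+3:ℕ):Int) by push_cast; ring,
        show ((j:Int) + -1) = ((j-1:ℕ):Int) by omega,
        show ((j:Int) + -2) = ((j-2:ℕ):Int) by omega,
        show ((j:Int) + -3) = ((j-3:ℕ):Int) by omega,
        pvGZ_ofNat, pvGZ_ofNat, pvGZ_ofNat, pvGZ_ofNat]
    unfold pvWinDL
    rw [pvComb_eq_some,
        show j - 3 + 1 = j - 2 by omega, show j - 3 + 2 = j - 1 by omega,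
        show j - 3 + 3 = j by omega]
  · simp only [h3, false_and, iff_false]
    rintro ⟨_, _, _, hS⟩
    rw [show ((j:Int) + -3) = (j:Int) - 3 by ring] at hS
    simp [pvGZ] at hS
    exact h3 hS.1.2
lemma pvOkA_m11 (ws : List String) (i j : ℕ) :
    pvOkA ws (i : Int) (j : Int) (-1, 1) =
      (decide (3 ≤ i) && decide (pvWinDL (pvRows ws) (i - 3) j = some ('S','A','M','X'))) := by
  rw [Bool.eq_iff_iff, pvOkA_iff]
  simp only [decide_eq_true_eq, Bool.and_eq_true]
  norm_num
  by_cases h3 : 3 ≤ i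
  · simp only [h3, true_and]
    rw [show ((i:Int) + -1) = ((i-1:ℕ):Int) by omega,
        show ((i:Int) + -2) = ((i-2:ℕ):Int) by omega,
        show ((i:Int) + -3) = ((i-3:ℕ):Int) by omega,
        show ((j:Int)+1) = ((j+1:ℕ):Int) by push_cast; ring,
        show ((j:Int)+2) = ((j+2:ℕ):Int) by push_cast; ring,
        show ((j:Int)+3) = ((j+3:ℕ):Int) by push_cast; ring,
        pvGZ_ofNat, pvGZ_ofNat, pvGZ_ofNat, pvGZ_ofNat]
    unfold pvWinDL
    rw [pvComb_eq_some,
        show i - 3 + 1 = i - 2 by omega, show i - 3 + 2 = i - 1 by omega,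
        show i - 3 + 3 = i by omega]
    tauto
  · simp only [h3, false_and, iff_false]
    rintro ⟨_, _, _, hS⟩
    rw [show ((i:Int) + -3) = (i:Int) - 3 by ring] at hS
    simp [pvGZ] at hS
    exact h3 hS.1.1

-- ---- A in normal form ----

def pvDC (ws : List String) (i j : ℕ) : ℕ := pvDirs.countP (pvOkA ws (i : Int) (j : Int))

lemma pvRlenA (ws : List String) {i : ℕ} (hi : i < ws.length) :
    PySem.Str.len ((PySem.List.pyGet? ws (i : Int)).getD "") = (((pvRows ws).getD i []).length : Int) := by
  have hr : ws[i]? = some (ws[i]) := List.getElem?_eq_getElem hi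
  rw [PySem.List.pyGet?_natCast, hr]
  simp [PySem.Str.len_eq, pvRows, List.getD, List.getElem?_map, hr]

lemma pvA_nf1 (ws : List String) :
    solution ws = ((∑ i ∈ Finset.range ws.length,
      ∑ j ∈ Finset.range (((pvRows ws).getD i []).length), pvDC ws i j : ℕ) : Int) := by
  unfold solution
  rw [PySem.List.pyRange_zero_natCast, List.foldl_map]
  rw [PySem.List.foldl_congr_mem (List.range ws.length) _
    (fun res iN => res + ((∑ j ∈ Finset.range (((pvRows ws).getD iN []).length), pvDC ws iN j : ℕ) : Int)) 0 ?_]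
  · rw [PySem.List.foldl_add, pvSumListInt, zero_add]
  · intro acc iN hiN
    have hi : iN < ws.length := List.mem_range.mp hiN
    rw [pvRlenA ws hi, PySem.List.pyRange_zero_natCast, List.foldl_map]
    rw [PySem.List.foldl_congr_mem (List.range _) _
      (fun res jN => res + ((pvDC ws iN jN : ℕ) : Int)) acc ?_]
    · rw [PySem.List.foldl_add, pvSumListInt]
    · intro acc2 jN _
      exact pvInner ws (iN : Int) (jN : Int) acc2

lemma pvG_none_i {rows : List (List Char)} {i j : ℕ} (h : rows.length ≤ i) :
    pvG rows i j = none := by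
  simp [pvG, List.getElem?_eq_none h]

lemma pvOkA_bounds {ws : List String} {i j : ℕ} {dd : Int × Int}
    (h : pvOkA ws (i : Int) (j : Int) dd = true) :
    i < ws.length ∧ j < ((pvRows ws).getD i []).length := by
  have h0 := ((pvOkA_iff ws (i : Int) (j : Int) dd).mp h).1
  rw [pvGZ_ofNat] at h0
  obtain ⟨h1, h2⟩ := pvG_some_bounds h0
  refine ⟨?_, h2⟩
  simpa [pvRows] using h1

lemma pvDC_zero_i {ws : List String} {i j : ℕ} (h : ws.length ≤ i) : pvDC ws i j = 0 := by
  unfold pvDC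
  rw [List.countP_eq_zero]
  intro dd _ hp
  exact absurd (pvOkA_bounds hp).1 (by omega)

lemma pvDC_zero_j {ws : List String} {i j : ℕ} (h : ((pvRows ws).getD i []).length ≤ j) :
    pvDC ws i j = 0 := by
  unfold pvDC
  rw [List.countP_eq_zero]
  intro dd _ hp
  exact absurd (pvOkA_bounds hp).2 (by omega)

lemma pvWinH_bounds {rows : List (List Char)} {i k : ℕ} {t : Char × Char × Char × Char}
    (h : pvWinH rows i k = some t) : i < rows.length ∧ k < (rows.getD i []).length := by
  obtain ⟨a, b, c, d⟩ := t
  rw [pvWinH, pvComb_eq_some] at h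
  exact pvG_some_bounds h.1

lemma pvWinV_bounds {rows : List (List Char)} {i k : ℕ} {t : Char × Char × Char × Char}
    (h : pvWinV rows i k = some t) : i < rows.length ∧ k < (rows.getD i []).length := by
  obtain ⟨a, b, c, d⟩ := t
  rw [pvWinV, pvComb_eq_some] at h
  exact pvG_some_bounds h.1

lemma pvWinDR_bounds {rows : List (List Char)} {i k : ℕ} {t : Char × Char × Char × Char}
    (h : pvWinDR rows i k = some t) : i < rows.length ∧ k < (rows.getD i []).length := by
  obtain ⟨a, b, c, d⟩ := t
  rw [pvWinDR, pvComb_eq_some] at h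
  exact pvG_some_bounds h.1

lemma pvWinDL_bounds {rows : List (List Char)} {i k : ℕ} {t : Char × Char × Char × Char}
    (h : pvWinDL rows i k = some t) : i < rows.length ∧ k + 3 < (rows.getD i []).length := by
  obtain ⟨a, b, c, d⟩ := t
  rw [pvWinDL, pvComb_eq_some] at h
  exact pvG_some_bounds h.1

lemma pvIX_zero_of {o : Option (Char × Char × Char × Char)}
    (h : ∀ t, o ≠ some t) : pvIX o = 0 := by
  unfold pvIX
  split_ifs with hw
  · exact absurd hw (h _)
  · rfl

lemma pvIS_zero_of {o : Option (Char × Char × Char × Char)}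
    (h : ∀ t, o ≠ some t) : pvIS o = 0 := by
  unfold pvIS
  split_ifs with hw
  · exact absurd hw (h _)
  · rfl

lemma pvDC_expand (ws : List String) (i j : ℕ) :
    pvDC ws i j =
      pvIX (pvWinDR (pvRows ws) i j)
      + pvIX (pvWinV (pvRows ws) i j)
      + (if 3 ≤ j then pvIX (pvWinDL (pvRows ws) i (j-3)) else 0)
      + pvIX (pvWinH (pvRows ws) i j)
      + (if 3 ≤ j then pvIS (pvWinH (pvRows ws) i (j-3)) else 0)
      + (if 3 ≤ i then pvIS (pvWinDL (pvRows ws) (i-3) j) else 0)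
      + (if 3 ≤ i then pvIS (pvWinV (pvRows ws) (i-3) j) else 0)
      + (if 3 ≤ i then (if 3 ≤ j then pvIS (pvWinDR (pvRows ws) (i-3) (j-3)) else 0) else 0) := by
  unfold pvDC pvDirs
  simp only [List.countP_cons, List.countP_nil,
    pvOkA_11, pvOkA_10, pvOkA_1m1, pvOkA_01, pvOkA_0m1, pvOkA_m11, pvOkA_m10, pvOkA_m1m1]
  unfold pvIX pvIS
  simp only [Bool.and_eq_true, decide_eq_true_eq]
  by_cases hi : 3 ≤ i <;> by_cases hj : 3 ≤ j <;> simp [hi, hj] <;> omega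

lemma pvA_eq (ws : List String) : solution ws = (pvNF ws : Int) := by
  have hrl : (pvRows ws).length = ws.length := by simp [pvRows]
  have hM3 : 3 ≤ pvM ws := by unfold pvM; omega
  have hMn : ws.length ≤ pvM ws := by unfold pvM; omega
  have hMn3 : ws.length + 3 ≤ pvM ws := by unfold pvM; omega
  have hMl3 : ∀ i, ((pvRows ws).getD i []).length + 3 ≤ pvM ws := by
    intro i
    have h := pvRlen_le_max (pvRows ws) i
    unfold pvM
    omega
  have main : (∑ i ∈ Finset.range ws.length,
      ∑ j ∈ Finset.range (((pvRows ws).getD i []).length), pvDC ws i j) = pvNF ws := by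
    have e1 : ∀ i, (∑ j ∈ Finset.range (((pvRows ws).getD i []).length), pvDC ws i j)
        = ∑ j ∈ Finset.range (pvM ws), pvDC ws i j := by
      intro i
      exact pvExtend _ (by have := hMl3 i; omega) (fun k hk => pvDC_zero_j hk)
    have e2 : (∑ i ∈ Finset.range ws.length, ∑ j ∈ Finset.range (pvM ws), pvDC ws i j)
        = ∑ i ∈ Finset.range (pvM ws), ∑ j ∈ Finset.range (pvM ws), pvDC ws i j :=
      pvExtend _ hMn (fun k hk => Finset.sum_eq_zero (fun j _ => pvDC_zero_i hk))
    rw [Finset.sum_congr rfl (fun i _ => e1 i), e2]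
    have S1 : (∑ i ∈ Finset.range (pvM ws), ∑ j ∈ Finset.range (pvM ws), (if 3 ≤ j then pvIX (pvWinDL (pvRows ws) i (j-3)) else 0))
        = ∑ i ∈ Finset.range (pvM ws), ∑ j ∈ Finset.range (pvM ws), pvIX (pvWinDL (pvRows ws) i j) := by
      refine Finset.sum_congr rfl (fun i _ => ?_)
      rw [pvShift3 _ hM3 (fun k hk => by simp [show ¬ 3 ≤ k by omega])
        (fun k hk => ?_)]
      · exact Finset.sum_congr rfl (fun k _ => by simp [show 3 ≤ k + 3 by omega])
      · split_ifs with hc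
        · refine pvIX_zero_of (fun t hw => ?_)
          have hb := (pvWinDL_bounds hw).2
          have := hMl3 i
          omega
        · rfl
    have S2 : (∑ i ∈ Finset.range (pvM ws), ∑ j ∈ Finset.range (pvM ws), (if 3 ≤ j then pvIS (pvWinH (pvRows ws) i (j-3)) else 0))
        = ∑ i ∈ Finset.range (pvM ws), ∑ j ∈ Finset.range (pvM ws), pvIS (pvWinH (pvRows ws) i j) := by
      refine Finset.sum_congr rfl (fun i _ => ?_)
      rw [pvShift3 _ hM3 (fun k hk => by simp [show ¬ 3 ≤ k by omega])
        (fun k hk => ?_)]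
      · exact Finset.sum_congr rfl (fun k _ => by simp [show 3 ≤ k + 3 by omega])
      · split_ifs with hc
        · refine pvIS_zero_of (fun t hw => ?_)
          have hb := (pvWinH_bounds hw).2
          have := hMl3 i
          omega
        · rfl
    have S3 : (∑ i ∈ Finset.range (pvM ws), ∑ j ∈ Finset.range (pvM ws), (if 3 ≤ i then pvIS (pvWinDL (pvRows ws) (i-3) j) else 0))
        = ∑ i ∈ Finset.range (pvM ws), ∑ j ∈ Finset.range (pvM ws), pvIS (pvWinDL (pvRows ws) i j) := by
      rw [pvShift3 _ hM3 (fun k hk => by simp [show ¬ 3 ≤ k by omega])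
        (fun k hk => Finset.sum_eq_zero (fun j _ => ?_))]
      · exact Finset.sum_congr rfl (fun i _ => by simp [show 3 ≤ i + 3 by omega])
      · split_ifs with hc
        · refine pvIS_zero_of (fun t hw => ?_)
          have hb := (pvWinDL_bounds hw).1
          omega
        · rfl
    have S4 : (∑ i ∈ Finset.range (pvM ws), ∑ j ∈ Finset.range (pvM ws), (if 3 ≤ i then pvIS (pvWinV (pvRows ws) (i-3) j) else 0))
        = ∑ i ∈ Finset.range (pvM ws), ∑ j ∈ Finset.range (pvM ws), pvIS (pvWinV (pvRows ws) i j) := by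
      rw [pvShift3 _ hM3 (fun k hk => by simp [show ¬ 3 ≤ k by omega])
        (fun k hk => Finset.sum_eq_zero (fun j _ => ?_))]
      · exact Finset.sum_congr rfl (fun i _ => by simp [show 3 ≤ i + 3 by omega])
      · split_ifs with hc
        · refine pvIS_zero_of (fun t hw => ?_)
          have hb := (pvWinV_bounds hw).1
          omega
        · rfl
    have S5 : (∑ i ∈ Finset.range (pvM ws), ∑ j ∈ Finset.range (pvM ws), (if 3 ≤ i then (if 3 ≤ j then pvIS (pvWinDR (pvRows ws) (i-3) (j-3)) else 0) else 0))
        = ∑ i ∈ Finset.range (pvM ws), ∑ j ∈ Finset.range (pvM ws), pvIS (pvWinDR (pvRows ws) i j) := by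
      have inner : ∀ i, (∑ j ∈ Finset.range (pvM ws), (if 3 ≤ i then (if 3 ≤ j then pvIS (pvWinDR (pvRows ws) (i-3) (j-3)) else 0) else 0))
          = ∑ j ∈ Finset.range (pvM ws), (if 3 ≤ i then pvIS (pvWinDR (pvRows ws) (i-3) j) else 0) := by
        intro i
        rw [pvShift3 _ hM3 (fun k hk => by simp [show ¬ 3 ≤ k by omega])
          (fun k hk => ?_)]
        · exact Finset.sum_congr rfl (fun k _ => by simp [show 3 ≤ k + 3 by omega])
        · split_ifs with hc1 hc2
          · refine pvIS_zero_of (fun t hw => ?_)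
            have hb := (pvWinDR_bounds hw).2
            have := hMl3 (i - 3)
            omega
          · rfl
          · rfl
      rw [Finset.sum_congr rfl (fun i _ => inner i)]
      rw [pvShift3 _ hM3 (fun k hk => by simp [show ¬ 3 ≤ k by omega])
        (fun k hk => Finset.sum_eq_zero (fun j _ => ?_))]
      · exact Finset.sum_congr rfl (fun i _ => by simp [show 3 ≤ i + 3 by omega])
      · split_ifs with hc
        · refine pvIS_zero_of (fun t hw => ?_)
          have hb := (pvWinDR_bounds hw).1
          omega
        · rfl
    calc (∑ i ∈ Finset.range (pvM ws), ∑ j ∈ Finset.range (pvM ws), pvDC ws i j)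
        = (∑ i ∈ Finset.range (pvM ws), ∑ j ∈ Finset.range (pvM ws), pvIX (pvWinDR (pvRows ws) i j))
        + (∑ i ∈ Finset.range (pvM ws), ∑ j ∈ Finset.range (pvM ws), pvIX (pvWinV (pvRows ws) i j))
        + (∑ i ∈ Finset.range (pvM ws), ∑ j ∈ Finset.range (pvM ws), (if 3 ≤ j then pvIX (pvWinDL (pvRows ws) i (j-3)) else 0))
        + (∑ i ∈ Finset.range (pvM ws), ∑ j ∈ Finset.range (pvM ws), pvIX (pvWinH (pvRows ws) i j))
        + (∑ i ∈ Finset.range (pvM ws), ∑ j ∈ Finset.range (pvM ws), (if 3 ≤ j then pvIS (pvWinH (pvRows ws) i (j-3)) else 0))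
        + (∑ i ∈ Finset.range (pvM ws), ∑ j ∈ Finset.range (pvM ws), (if 3 ≤ i then pvIS (pvWinDL (pvRows ws) (i-3) j) else 0))
        + (∑ i ∈ Finset.range (pvM ws), ∑ j ∈ Finset.range (pvM ws), (if 3 ≤ i then pvIS (pvWinV (pvRows ws) (i-3) j) else 0))
        + (∑ i ∈ Finset.range (pvM ws), ∑ j ∈ Finset.range (pvM ws), (if 3 ≤ i then (if 3 ≤ j then pvIS (pvWinDR (pvRows ws) (i-3) (j-3)) else 0) else 0)) := by
          rw [Finset.sum_congr rfl (fun i _ => Finset.sum_congr rfl (fun j _ => pvDC_expand ws i j))]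
          simp only [Finset.sum_add_distrib]
      _ = pvNF ws := by
          rw [S1, S2, S3, S4, S5]
          unfold pvNF pvCell
          simp only [Finset.sum_add_distrib]
          ring
  rw [pvA_nf1, main]

-- ---- B in normal form ----

lemma pvRowsGetD (ws : List String) (i : ℕ) :
    (pvRows ws).getD i [] = (ws.getD i "").toList := by
  unfold pvRows
  simp only [List.getD, List.getElem?_map]
  cases ws[i]? <;> simp

lemma pvG_lt {rows : List (List Char)} {i : ℕ} (j : ℕ) (h : i < rows.length) :
    pvG rows i j = (rows.getD i [])[j]? := by
  simp [pvG, List.getD, List.getElem?_eq_getElem h]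

lemma pvWinV_bounds4 {rows : List (List Char)} {i k : ℕ} {t : Char × Char × Char × Char}
    (h : pvWinV rows i k = some t) : i + 3 < rows.length := by
  obtain ⟨a, b, c, d⟩ := t
  rw [pvWinV, pvComb_eq_some] at h
  exact (pvG_some_bounds h.2.2.2).1

lemma pvWinDR_bounds4 {rows : List (List Char)} {i k : ℕ} {t : Char × Char × Char × Char}
    (h : pvWinDR rows i k = some t) : i + 3 < rows.length := by
  obtain ⟨a, b, c, d⟩ := t
  rw [pvWinDR, pvComb_eq_some] at h
  exact (pvG_some_bounds h.2.2.2).1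

lemma pvWinDL_bounds4 {rows : List (List Char)} {i k : ℕ} {t : Char × Char × Char × Char}
    (h : pvWinDL rows i k = some t) : i + 3 < rows.length := by
  obtain ⟨a, b, c, d⟩ := t
  rw [pvWinDL, pvComb_eq_some] at h
  exact (pvG_some_bounds h.2.2.2).1

lemma pvWinH_none {rows : List (List Char)} {i : ℕ} (k : ℕ) (h : rows.length ≤ i) :
    pvWinH rows i k = none := by
  rw [pvWinH, pvG_none_i h]
  rfl

lemma pvRlenW (ws : List String) (i : ℕ) :
    (ws.getD i "").toList.length ≤ pvM ws := by
  have h := pvRlen_le_max (pvRows ws) i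
  rw [pvRowsGetD] at h
  unfold pvM
  omega

lemma pvHrow (ws : List String) {i : ℕ} (hi : i < ws.length) :
    pvCount4 ((ws.getD i "").toList) ((ws.getD i "").toList.drop 1)
        ((ws.getD i "").toList.drop 2) ((ws.getD i "").toList.drop 3)
      = ((∑ k ∈ Finset.range (pvM ws),
          (pvIX (pvWinH (pvRows ws) i k) + pvIS (pvWinH (pvRows ws) i k)) : ℕ) : Int) := by
  have hrl : (pvRows ws).length = ws.length := by simp [pvRows]
  rw [pvCount4_eq _ _ _ _ (pvRlenW ws i)]
  congr 1
  refine Finset.sum_congr rfl (fun k _ => ?_)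
  rw [pvWinH, pvG_lt k (by omega), pvG_lt (k+1) (by omega), pvG_lt (k+2) (by omega),
    pvG_lt (k+3) (by omega), pvRowsGetD]
  simp [List.getElem?_drop, Nat.add_comm]

lemma pvVrow (ws : List String) {i : ℕ} (hi : i + 3 < ws.length) :
    pvCount4 ((ws.getD i "").toList) ((ws.getD (i+1) "").toList)
        ((ws.getD (i+2) "").toList) ((ws.getD (i+3) "").toList)
      = ((∑ k ∈ Finset.range (pvM ws),
          (pvIX (pvWinV (pvRows ws) i k) + pvIS (pvWinV (pvRows ws) i k)) : ℕ) : Int) := by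
  have hrl : (pvRows ws).length = ws.length := by simp [pvRows]
  rw [pvCount4_eq _ _ _ _ (pvRlenW ws i)]
  congr 1
  refine Finset.sum_congr rfl (fun k _ => ?_)
  rw [pvWinV, pvG_lt k (by omega), pvG_lt k (i := i+1) (by omega), pvG_lt k (i := i+2) (by omega),
    pvG_lt k (i := i+3) (by omega), pvRowsGetD, pvRowsGetD, pvRowsGetD, pvRowsGetD]

lemma pvDRrow (ws : List String) {i : ℕ} (hi : i + 3 < ws.length) :
    pvCount4 ((ws.getD i "").toList) ((ws.getD (i+1) "").toList.drop 1)
        ((ws.getD (i+2) "").toList.drop 2) ((ws.getD (i+3) "").toList.drop 3)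
      = ((∑ k ∈ Finset.range (pvM ws),
          (pvIX (pvWinDR (pvRows ws) i k) + pvIS (pvWinDR (pvRows ws) i k)) : ℕ) : Int) := by
  have hrl : (pvRows ws).length = ws.length := by simp [pvRows]
  rw [pvCount4_eq _ _ _ _ (pvRlenW ws i)]
  congr 1
  refine Finset.sum_congr rfl (fun k _ => ?_)
  rw [pvWinDR, pvG_lt k (by omega), pvG_lt (k+1) (i := i+1) (by omega),
    pvG_lt (k+2) (i := i+2) (by omega), pvG_lt (k+3) (i := i+3) (by omega),
    pvRowsGetD, pvRowsGetD, pvRowsGetD, pvRowsGetD]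
  simp [List.getElem?_drop, Nat.add_comm]

lemma pvDLrow (ws : List String) {i : ℕ} (hi : i + 3 < ws.length) :
    pvCount4 ((ws.getD i "").toList.drop 3) ((ws.getD (i+1) "").toList.drop 2)
        ((ws.getD (i+2) "").toList.drop 1) ((ws.getD (i+3) "").toList)
      = ((∑ k ∈ Finset.range (pvM ws),
          (pvIX (pvWinDL (pvRows ws) i k) + pvIS (pvWinDL (pvRows ws) i k)) : ℕ) : Int) := by
  have hrl : (pvRows ws).length = ws.length := by simp [pvRows]
  rw [pvCount4_eq _ _ _ _ (le_trans (by simp) (pvRlenW ws i))]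
  congr 1
  refine Finset.sum_congr rfl (fun k _ => ?_)
  rw [pvWinDL, pvG_lt (k+3) (by omega), pvG_lt (k+2) (i := i+1) (by omega),
    pvG_lt (k+1) (i := i+2) (by omega), pvG_lt k (i := i+3) (by omega),
    pvRowsGetD, pvRowsGetD, pvRowsGetD, pvRowsGetD]
  simp [List.getElem?_drop, Nat.add_comm]

lemma pvQlen (ws : List String) :
    (pvZip4 ws (ws.drop 1) (ws.drop 2) (ws.drop 3)).length = ws.length - 3 := by
  rw [pvZip4_length]
  simp only [List.length_drop, Nat.min_def]
  split_ifs <;> omega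

lemma pvQ_getD (ws : List String) {i : ℕ} (h : i + 3 < ws.length) :
    (pvZip4 ws (ws.drop 1) (ws.drop 2) (ws.drop 3)).getD i ("", "", "", "")
      = (ws.getD i "", ws.getD (i+1) "", ws.getD (i+2) "", ws.getD (i+3) "") := by
  rw [List.getD_eq_getElem?_getD, pvZip4_getElem?]
  simp only [List.getElem?_drop]
  rw [List.getElem?_eq_getElem (show i < ws.length by omega),
    List.getElem?_eq_getElem (show 1 + i < ws.length by omega),
    List.getElem?_eq_getElem (show 2 + i < ws.length by omega),
    List.getElem?_eq_getElem (show 3 + i < ws.length by omega)]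
  simp [pvComb, List.getD_eq_getElem?_getD,
    List.getElem?_eq_getElem (show i < ws.length by omega),
    List.getElem?_eq_getElem (show i + 1 < ws.length by omega),
    List.getElem?_eq_getElem (show i + 2 < ws.length by omega),
    List.getElem?_eq_getElem (show i + 3 < ws.length by omega),
    show 1 + i = i + 1 by omega, show 2 + i = i + 2 by omega, show 3 + i = i + 3 by omega]

lemma pvSumMapGetDInt {α : Type} (l : List α) (d : α) (F : α → Int) :
    (l.map F).sum = ∑ i ∈ Finset.range l.length, F (l.getD i d) := by
  induction l with
  | nil => simp
  | cons a l ih => simp [Finset.sum_range_succ', ih]; omega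

lemma pvQrow (ws : List String) {i : ℕ} (hib : i + 3 < ws.length) :
    pvCount4 ((ws.getD i "").toList) ((ws.getD (i+1) "").toList)
        ((ws.getD (i+2) "").toList) ((ws.getD (i+3) "").toList) +
      pvCount4 ((ws.getD i "").toList) ((ws.getD (i+1) "").toList.drop 1)
        ((ws.getD (i+2) "").toList.drop 2) ((ws.getD (i+3) "").toList.drop 3) +
      pvCount4 ((ws.getD i "").toList.drop 3) ((ws.getD (i+1) "").toList.drop 2)
        ((ws.getD (i+2) "").toList.drop 1) ((ws.getD (i+3) "").toList)
      = ((∑ k ∈ Finset.range (pvM ws),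
          (pvIX (pvWinV (pvRows ws) i k) + pvIS (pvWinV (pvRows ws) i k) +
           (pvIX (pvWinDR (pvRows ws) i k) + pvIS (pvWinDR (pvRows ws) i k)) +
           (pvIX (pvWinDL (pvRows ws) i k) + pvIS (pvWinDL (pvRows ws) i k))) : ℕ) : Int) := by
  rw [pvVrow ws hib, pvDRrow ws hib, pvDLrow ws hib, ← Nat.cast_add, ← Nat.cast_add]
  congr 1
  simp only [Finset.sum_add_distrib]

lemma pvB_eq (ws : List String) : solution_alt ws = (pvNF ws : Int) := by
  have hrl : (pvRows ws).length = ws.length := by simp [pvRows]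
  have hM3 : 3 ≤ pvM ws := by unfold pvM; omega
  have hMn : ws.length ≤ pvM ws := by unfold pvM; omega
  simp only [solution_alt]
  rw [show List.foldl (fun (res : Int) (r : String) =>
        res + pvCount4 r.toList (r.toList.drop 1) (r.toList.drop 2) (r.toList.drop 3)) 0 ws
      = 0 + (ws.map (fun r =>
          pvCount4 r.toList (r.toList.drop 1) (r.toList.drop 2) (r.toList.drop 3))).sum
    from PySem.List.foldl_add ws _ 0, zero_add]
  rw [PySem.List.foldl_congr_mem (pvZip4 ws (ws.drop 1) (ws.drop 2) (ws.drop 3))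
    (fun (res : Int) q =>
      res + pvCount4 q.1.toList q.2.1.toList q.2.2.1.toList q.2.2.2.toList +
        pvCount4 q.1.toList (q.2.1.toList.drop 1) (q.2.2.1.toList.drop 2) (q.2.2.2.toList.drop 3) +
        pvCount4 (q.1.toList.drop 3) (q.2.1.toList.drop 2) (q.2.2.1.toList.drop 1) q.2.2.2.toList)
    (fun (res : Int) q =>
      res + (pvCount4 q.1.toList q.2.1.toList q.2.2.1.toList q.2.2.2.toList +
        pvCount4 q.1.toList (q.2.1.toList.drop 1) (q.2.2.1.toList.drop 2) (q.2.2.2.toList.drop 3) +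
        pvCount4 (q.1.toList.drop 3) (q.2.1.toList.drop 2) (q.2.2.1.toList.drop 1) q.2.2.2.toList))
    _ (fun acc q _ => by ring)]
  rw [PySem.List.foldl_add]
  have eH : (ws.map (fun r =>
      pvCount4 r.toList (r.toList.drop 1) (r.toList.drop 2) (r.toList.drop 3))).sum
      = ((∑ i ∈ Finset.range (pvM ws), ∑ k ∈ Finset.range (pvM ws),
          (pvIX (pvWinH (pvRows ws) i k) + pvIS (pvWinH (pvRows ws) i k)) : ℕ) : Int) := by
    rw [pvSumMapGetDInt ws "" _]
    refine Eq.trans (Finset.sum_congr rfl (fun i hi => pvHrow ws (List.mem_range.mp hi))) ?_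
    rw [← Nat.cast_sum]
    congr 1
    exact pvExtend _ hMn (fun i hi => Finset.sum_eq_zero (fun k _ => by
      rw [pvWinH_none k (by omega)]
      simp [pvIX, pvIS]))
  have eQ : ((pvZip4 ws (ws.drop 1) (ws.drop 2) (ws.drop 3)).map (fun q =>
      pvCount4 q.1.toList q.2.1.toList q.2.2.1.toList q.2.2.2.toList +
        pvCount4 q.1.toList (q.2.1.toList.drop 1) (q.2.2.1.toList.drop 2) (q.2.2.2.toList.drop 3) +
        pvCount4 (q.1.toList.drop 3) (q.2.1.toList.drop 2) (q.2.2.1.toList.drop 1) q.2.2.2.toList)).sum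
      = ((∑ i ∈ Finset.range (pvM ws), ∑ k ∈ Finset.range (pvM ws),
          (pvIX (pvWinV (pvRows ws) i k) + pvIS (pvWinV (pvRows ws) i k) +
           (pvIX (pvWinDR (pvRows ws) i k) + pvIS (pvWinDR (pvRows ws) i k)) +
           (pvIX (pvWinDL (pvRows ws) i k) + pvIS (pvWinDL (pvRows ws) i k))) : ℕ) : Int) := by
    rw [pvSumMapGetDInt _ ("", "", "", "") _]
    rw [pvQlen]
    trans (∑ i ∈ Finset.range (ws.length - 3),
      ((∑ k ∈ Finset.range (pvM ws),
          (pvIX (pvWinV (pvRows ws) i k) + pvIS (pvWinV (pvRows ws) i k) +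
           (pvIX (pvWinDR (pvRows ws) i k) + pvIS (pvWinDR (pvRows ws) i k)) +
           (pvIX (pvWinDL (pvRows ws) i k) + pvIS (pvWinDL (pvRows ws) i k))) : ℕ) : Int))
    · refine Finset.sum_congr rfl (fun i hi => ?_)
      have hib : i + 3 < ws.length := by have := List.mem_range.mp hi; omega
      rw [pvQ_getD ws hib]
      exact pvQrow ws hib
    rw [← Nat.cast_sum]
    congr 1
    refine pvExtend _ (by omega) (fun i hi => Finset.sum_eq_zero (fun k _ => ?_))
    have hV : pvIX (pvWinV (pvRows ws) i k) = 0 ∧ pvIS (pvWinV (pvRows ws) i k) = 0 := by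
      constructor <;> [refine pvIX_zero_of (fun t hw => ?_); refine pvIS_zero_of (fun t hw => ?_)] <;>
        · have := pvWinV_bounds4 hw
          omega
    have hDR : pvIX (pvWinDR (pvRows ws) i k) = 0 ∧ pvIS (pvWinDR (pvRows ws) i k) = 0 := by
      constructor <;> [refine pvIX_zero_of (fun t hw => ?_); refine pvIS_zero_of (fun t hw => ?_)] <;>
        · have := pvWinDR_bounds4 hw
          omega
    have hDL : pvIX (pvWinDL (pvRows ws) i k) = 0 ∧ pvIS (pvWinDL (pvRows ws) i k) = 0 := by
      constructor <;> [refine pvIX_zero_of (fun t hw => ?_); refine pvIS_zero_of (fun t hw => ?_)] <;>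
        · have := pvWinDL_bounds4 hw
          omega
    omega
  rw [eH, eQ, ← Nat.cast_add]
  congr 1
  unfold pvNF pvCell
  rw [← Finset.sum_add_distrib]
  refine Finset.sum_congr rfl (fun i _ => ?_)
  rw [← Finset.sum_add_distrib]
  refine Finset.sum_congr rfl (fun k _ => ?_)
  ring

-- ===== VERDICT (by name: the statement is the Claim_ definition above) =====
theorem solution_spec : Claim_equal_solution := by
  intro ws _
  unfold Spec_solution
  rw [pvA_eq, pvB_eq]
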